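-- pv_equiv track=rewrite | github.com/bdarapu/SET_Game | set_game.py | checkAlltriplesDisjoint
-- ===== SOURCE A (Python) =====
-- def check_disjoint(triple1,triple2):
-- 	for card1 in triple1:
-- 		for card2 in triple2:
-- 			if(card1==card2): return False
-- 	return True
--
-- def checkAlltriplesDisjoint(valid_triples):
-- 	for i in range(len(valid_triples)):
-- 		count=0 # counts the number of triples that are disjoint with elemant at index i
-- 		for j in range(i+1,len(valid_triples)):
-- 			if(check_disjoint(valid_triples[i],valid_triples[j])): count+=1
-- 		if(count!=len(valid_triples)-(i+1)):
-- 			return False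
-- 	return True
-- ===== SOURCE B (Python) =====
-- def checkAlltriplesDisjoint(valid_triples):
--     seen = set()
--     for triple in valid_triples:
--         cards = set(triple)
--         if not cards.isdisjoint(seen):
--             return False
--         seen |= cards
--     return True
-- ===== Notes on version B (the rewrite author's own statement) =====
-- stated objective: faster
-- what changed: replaces the all-pairs nested scan (every triple compared card-by-card with every later triple) by a single pass that accumulates a hash set of seen cards and fails on the first cross-triple duplicate
import Mathlib
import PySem

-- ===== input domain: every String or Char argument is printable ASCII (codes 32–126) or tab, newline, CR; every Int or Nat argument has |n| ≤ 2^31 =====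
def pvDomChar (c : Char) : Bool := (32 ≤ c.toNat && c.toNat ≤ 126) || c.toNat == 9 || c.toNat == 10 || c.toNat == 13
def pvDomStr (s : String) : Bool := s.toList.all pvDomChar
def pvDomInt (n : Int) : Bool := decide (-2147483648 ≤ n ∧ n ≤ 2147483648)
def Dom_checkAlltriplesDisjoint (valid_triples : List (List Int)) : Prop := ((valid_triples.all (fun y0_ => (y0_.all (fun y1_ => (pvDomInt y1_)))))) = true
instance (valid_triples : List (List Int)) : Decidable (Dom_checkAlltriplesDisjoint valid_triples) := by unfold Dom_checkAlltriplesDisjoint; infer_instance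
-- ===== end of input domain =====

-- B replaces A's all-pairs nested scan by a single pass over a growing set of seen cards
-- (timing-checked asymptotic speed-up); return values are proved equal on every input.

-- ===== PORT A =====
-- check_disjoint: nested for-loops, early return False on a shared card
def checkDisjointA (triple1 triple2 : List Int) : Bool :=
  triple1.all (fun card1 => triple2.all (fun card2 => !(card1 == card2)))

-- outer loop of A over i ∈ range(len(valid_triples)), with early return False
def aLoop (vt : List (List Int)) : List Int → Bool
  | [] => true
  | i :: rest =>
      -- count = number of j ∈ range(i+1, len(vt)) with vt[i], vt[j] disjoint
      let count : Int := (PySem.List.pyRange (i + 1) (PySem.List.len vt) 1).foldl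
        (fun c j => if checkDisjointA (PySem.List.pyGetD vt i []) (PySem.List.pyGetD vt j []) then c + 1 else c) 0
      if count ≠ (PySem.List.len vt) - (i + 1) then false else aLoop vt rest

def checkAlltriplesDisjoint (valid_triples : List (List Int)) : Bool :=
  aLoop valid_triples (PySem.List.pyRange 0 (PySem.List.len valid_triples) 1)

-- ===== PORT B =====
-- single pass: seen = accumulated set of cards of earlier triples
def bLoop (seen : PySem.Set Int) : List (List Int) → Bool
  | [] => true
  | triple :: rest =>
      let cards : PySem.Set Int := PySem.Set.ofList triple
      if !(PySem.Set.isdisjoint cards seen) then false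
      else bLoop (PySem.Set.union seen cards) rest

def checkAlltriplesDisjoint_alt (valid_triples : List (List Int)) : Bool :=
  bLoop PySem.Set.empty valid_triples

-- ===== PRECONDITION & SPEC =====
def Spec_checkAlltriplesDisjoint (valid_triples : List (List Int)) (out : Bool) : Prop := out = checkAlltriplesDisjoint_alt valid_triples
instance (valid_triples : List (List Int)) (out : Bool) : Decidable (Spec_checkAlltriplesDisjoint valid_triples out) := by unfold Spec_checkAlltriplesDisjoint; infer_instance

-- ===== CLAIM (what is proved, stated in full; the proofs are below) =====
def Claim_equal_checkAlltriplesDisjoint : Prop := ∀ (valid_triples : List (List Int)), Dom_checkAlltriplesDisjoint valid_triples → Spec_checkAlltriplesDisjoint valid_triples (checkAlltriplesDisjoint valid_triples)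

-- ===== LEMMAS AND PROOFS =====

-- the disjointness relation both programs decide
def RDisj (t u : List Int) : Prop := ∀ c ∈ t, c ∉ u

lemma checkDisjointA_iff (t u : List Int) : checkDisjointA t u = true ↔ RDisj t u := by
  simp only [checkDisjointA, RDisj, List.all_eq_true, Bool.not_eq_eq_eq_not, Bool.not_true,
    beq_eq_false_iff_ne, ne_eq]
  exact ⟨fun h c hc hcu => h c hc c hcu rfl, fun h c hc d hd he => h c hc (he ▸ hd)⟩

-- A's inner count equals the number of later triples disjoint from vt[k]
lemma count_foldl_eq (l : List (List Int)) (x : List Int) :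
    (l.foldl (fun (c : Int) u => if checkDisjointA x u then c + 1 else c) 0)
      = (l.countP (fun u => checkDisjointA x u) : Int) := by
  have h : ∀ (l : List (List Int)) (c : Int),
      l.foldl (fun (c : Int) u => if checkDisjointA x u then c + 1 else c) c
        = c + (l.countP (fun u => checkDisjointA x u) : Int) := by
    intro l
    induction l with
    | nil => simp
    | cons u l ih =>
      intro c
      by_cases h : checkDisjointA x u = true <;>
        simp [h, ih]; ring
  simpa using h l 0

lemma count_eq_len_iff (l : List (List Int)) (x : List Int) :
    ((l.countP (fun u => checkDisjointA x u) : Int) = (l.length : Int))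
      ↔ ∀ u ∈ l, RDisj x u := by
  rw [Int.natCast_inj]
  constructor
  · intro h u hu
    rw [← checkDisjointA_iff]
    exact List.countP_eq_length.mp h u hu
  · intro h
    exact List.countP_eq_length.mpr (fun u hu => (checkDisjointA_iff x u).mpr (h u hu))

-- characterisation of A's outer loop, from index k to the end
lemma aLoop_char (vt : List (List Int)) :
    ∀ (m k : Nat), k + m = vt.length →
      (aLoop vt (PySem.List.pyRange (k : Int) (PySem.List.len vt) 1) = true
        ↔ List.Pairwise RDisj (vt.drop k)) := by
  intro m
  induction m with
  | zero =>
    intro k hk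
    have h0 : PySem.List.len vt ≤ (k : Int) := by simp [PySem.List.len_eq]; omega
    rw [PySem.List.pyRange_one_eq_nil h0, List.drop_eq_nil_of_le (by omega)]
    simp [aLoop]
  | succ m ih =>
    intro k hk
    have hklt : k < vt.length := by omega
    rw [PySem.List.pyRange_one_cons (by simp [PySem.List.len_eq]; exact_mod_cast hklt)]
    have hdrop : vt.drop k = vt[k] :: vt.drop (k + 1) :=
      List.drop_eq_getElem_cons hklt
    rw [hdrop]
    simp only [aLoop]
    have hget : PySem.List.pyGetD vt (k : Int) [] = vt[k] := by
      rw [PySem.List.pyGetD_natCast]; exact List.getD_eq_getElem vt [] hklt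
    have hfold :
        (PySem.List.pyRange ((k : Int) + 1) (PySem.List.len vt) 1).foldl
          (fun (c : Int) j => if checkDisjointA (PySem.List.pyGetD vt (k : Int) [])
              (PySem.List.pyGetD vt j []) then c + 1 else c) 0
          = ((vt.drop (k + 1)).countP (fun u => checkDisjointA vt[k] u) : Int) := by
      have := PySem.List.foldl_pyRange_pyGetD (a := (k : Int) + 1) (xs := vt) (d := [])
        (f := fun (c : Int) u => if checkDisjointA vt[k] u then c + 1 else c)
        (init := (0 : Int)) (by omega)
      rw [hget]
      have hcast : (((k : Int) + 1)).toNat = k + 1 := by omega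
      rw [this, hcast, count_foldl_eq]
    rw [hfold]
    simp only [PySem.List.len_eq]
    have hlen : ((vt.drop (k + 1)).length : Int) = (vt.length : Int) - ((k : Int) + 1) := by
      simp; omega
    by_cases hc : ∀ u ∈ vt.drop (k + 1), RDisj vt[k] u
    · have : ((vt.drop (k + 1)).countP (fun u => checkDisjointA vt[k] u) : Int)
          = (vt.length : Int) - ((k : Int) + 1) := by
        rw [← hlen]; exact (count_eq_len_iff _ _).mpr hc
      rw [if_neg (by simp [this])]
      have hk1 : (k + 1) + m = vt.length := by omega
      have hih := ih (k + 1) hk1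
      simp only [PySem.List.len_eq, Nat.cast_add, Nat.cast_one] at hih
      rw [List.pairwise_cons, hih]
      tauto
    · have : ((vt.drop (k + 1)).countP (fun u => checkDisjointA vt[k] u) : Int)
          ≠ (vt.length : Int) - ((k : Int) + 1) := by
        rw [← hlen]; intro h; exact hc ((count_eq_len_iff _ _).mp h)
      rw [if_pos this]
      rw [List.pairwise_cons]
      simp only [Bool.false_eq_true, false_iff]
      tauto

-- characterisation of B's single pass
lemma bLoop_char (ts : List (List Int)) :
    ∀ (seen : PySem.Set Int),
      (bLoop seen ts = true ↔
        (∀ t ∈ ts, ∀ c ∈ t, c ∉ seen) ∧ List.Pairwise RDisj ts) := by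
  induction ts with
  | nil => intro seen; simp [bLoop]
  | cons t rest ih =>
    intro seen
    simp only [bLoop]
    by_cases hd : PySem.Set.isdisjoint (PySem.Set.ofList t) seen = true
    · rw [if_neg (by simp [hd])]
      rw [ih]
      have hdm : ∀ c ∈ t, c ∉ seen := by
        intro c hc
        exact (PySem.Set.isdisjoint_iff _ _).mp hd c ((PySem.Set.mem_ofList t c).mpr hc)
      constructor
      · rintro ⟨h1, h2⟩
        refine ⟨?_, ?_⟩
        · intro u hu c hc
          rcases List.mem_cons.mp hu with rfl | hu
          · exact hdm c hc
          · intro hcs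
            exact h1 u hu c hc (by rw [PySem.Set.mem_union]; left; exact hcs)
        · rw [List.pairwise_cons]
          refine ⟨?_, h2⟩
          intro u hu c hc hcu
          exact h1 u hu c hcu (by rw [PySem.Set.mem_union, PySem.Set.mem_ofList]; right; exact hc)
      · rintro ⟨h1, h2⟩
        rw [List.pairwise_cons] at h2
        refine ⟨?_, h2.2⟩
        intro u hu c hc hmem
        rw [PySem.Set.mem_union, PySem.Set.mem_ofList] at hmem
        rcases hmem with hs | ht
        · exact h1 u (List.mem_cons_of_mem t hu) c hc hs
        · exact h2.1 u hu c ht hc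
    · rw [if_pos (by simp [hd])]
      simp only [Bool.false_eq_true, false_iff]
      rintro ⟨h1, _⟩
      apply hd
      rw [PySem.Set.isdisjoint_iff]
      intro c hc
      rw [PySem.Set.mem_ofList] at hc
      exact h1 t (List.mem_cons_self) c hc

-- ===== VERDICT (by name: the statement is the Claim_ definition above) =====
theorem checkAlltriplesDisjoint_spec : Claim_equal_checkAlltriplesDisjoint := by
  intro vt _
  unfold Spec_checkAlltriplesDisjoint
  have hA : checkAlltriplesDisjoint vt = true ↔ List.Pairwise RDisj vt := by
    have := aLoop_char vt vt.length 0 (by omega)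
    simpa [checkAlltriplesDisjoint] using this
  have hB : checkAlltriplesDisjoint_alt vt = true ↔ List.Pairwise RDisj vt := by
    have := bLoop_char vt PySem.Set.empty
    simp only [checkAlltriplesDisjoint_alt]
    rw [this]
    have hemp : ∀ c : Int, c ∉ (PySem.Set.empty : PySem.Set Int) := by
      intro c h; simp [PySem.Set.empty] at h
    constructor
    · exact fun h => h.2
    · exact fun h => ⟨fun t _ c _ => hemp c, h⟩
  cases hX : checkAlltriplesDisjoint vt <;> cases hY : checkAlltriplesDisjoint_alt vt <;>
    simp_all
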